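-- pv_equiv track=rewrite | github.com/ChenHong30/Beacon_Multiturn | eval/gsm8k_interference/gsm8k_interference_utils.py | count_conversation_rounds
-- ===== SOURCE A (Python) =====
-- from typing import Any, Dict, List, Optional, Tuple
--
-- def normalize_role(role: Optional[str]) -> str:
--     role = (role or "user").lower()
--     if role not in {"user", "assistant", "system"}:
--         return "user"
--     return role
--
-- def count_conversation_rounds(conversation: List[Dict[str, Any]]) -> int:
--     rounds = 0
--     prev_role: Optional[str] = None
--     for msg in conversation:
--         if not isinstance(msg, dict):
--             continue
--         role = normalize_role(msg.get("role"))
--         if role == "system":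
--             continue
--         if prev_role == "user" and role == "assistant":
--             rounds += 1
--         prev_role = role
--     return rounds
-- ===== SOURCE B (Python) =====
-- def normalize_role(role):
--     role = (role or "user").lower()
--     if role not in {"user", "assistant", "system"}:
--         return "user"
--     return role
--
-- def count_conversation_rounds(conversation):
--     # Greedy round extraction: after normalizing/filtering roles (binary alphabet
--     # user/assistant), repeatedly skip to the next "user", then skip to the next
--     # "assistant" after it; each such match is one round. Correct because a
--     # user->assistant transition happens exactly at the start of each maximal
--     # assistant-run that follows a user.
--     roles = [normalize_role(m.get("role")) for m in conversation if isinstance(m, dict)]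
--     roles = [r for r in roles if r != "system"]
--     rounds = 0
--     rest = roles
--     while True:
--         while rest and rest[0] != "user":
--             rest = rest[1:]
--         while rest and rest[0] != "assistant":
--             rest = rest[1:]
--         if not rest:
--             return rounds
--         rounds += 1
--         rest = rest[1:]
-- ===== Notes on version B (the rewrite author's own statement) =====
-- stated objective: alternative
-- what changed: Replaces A's adjacent-pair scan with prev_role state by greedy round extraction: after normalizing/filtering roles, repeatedly skip forward to the next 'user' and then to the next 'assistant' after it, counting one round per match (correct because the filtered alphabet is binary, so transitions are exactly the assistant-runs that follow a user).
import Mathlib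
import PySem

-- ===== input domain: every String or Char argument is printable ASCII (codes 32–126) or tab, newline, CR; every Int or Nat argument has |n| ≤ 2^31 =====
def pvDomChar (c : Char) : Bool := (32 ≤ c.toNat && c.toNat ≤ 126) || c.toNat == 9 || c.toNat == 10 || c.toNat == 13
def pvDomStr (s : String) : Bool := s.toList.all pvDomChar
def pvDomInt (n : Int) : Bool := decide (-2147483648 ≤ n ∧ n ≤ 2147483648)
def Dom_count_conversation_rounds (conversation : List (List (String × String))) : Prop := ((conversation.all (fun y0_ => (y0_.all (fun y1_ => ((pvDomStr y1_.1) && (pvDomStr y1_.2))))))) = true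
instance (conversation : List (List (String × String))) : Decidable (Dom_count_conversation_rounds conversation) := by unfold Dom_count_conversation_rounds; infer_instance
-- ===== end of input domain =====

-- B replaces A's stateful adjacent-pair scan by greedy round extraction (skip to next user, then next assistant) over the filtered roles (alternative, same cost).

-- ===== PORT A =====
-- normalize_role: (role or "user").lower(); fall back to "user" if not a known role
def normalizeRole (r : Option String) : String :=
  let role := PySem.Str.lower (match r with | none => "user" | some s => if s = "" then "user" else s)
  if role = "user" ∨ role = "assistant" ∨ role = "system" then role else "user"

def count_conversation_rounds (conversation : List (List (String × String))) : Int :=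
  (conversation.foldl (fun (st : Int × Option String) msg =>
      let role := normalizeRole ((PySem.Dict.mk msg).get? "role")
      if role = "system" then st
      else (if st.2 = some "user" ∧ role = "assistant" then st.1 + 1 else st.1, some role))
    (0, none)).1

-- ===== PORT B =====
-- the two list comprehensions of Source B (every msg is a dict under the type convention)
def rolesOf (conversation : List (List (String × String))) : List String :=
  (conversation.map (fun msg => normalizeRole ((PySem.Dict.mk msg).get? "role"))).filter (fun r => r ≠ "system")

-- Source B's outer while loop; each inner `while rest and rest[0] != x: rest = rest[1:]` is exactly dropWhile
def goRounds (rounds : Int) (rest : List String) : Int :=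
  match h : (rest.dropWhile (fun r => r ≠ "user")).dropWhile (fun r => r ≠ "assistant") with
  | [] => rounds
  | _ :: t => goRounds (rounds + 1) t
termination_by rest.length
decreasing_by
  have h1 : ((rest.dropWhile (fun r => r ≠ "user")).dropWhile (fun r => r ≠ "assistant")).length ≤ rest.length :=
    le_trans ((List.dropWhile_sublist _).length_le) ((List.dropWhile_sublist _).length_le)
  rw [h] at h1; simp at h1; omega

def count_conversation_rounds_alt (conversation : List (List (String × String))) : Int :=
  goRounds 0 (rolesOf conversation)

-- ===== PRECONDITION & SPEC =====
def Spec_count_conversation_rounds (conversation : List (List (String × String))) (out : Int) : Prop := out = count_conversation_rounds_alt conversation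
instance (conversation : List (List (String × String))) (out : Int) : Decidable (Spec_count_conversation_rounds conversation out) := by unfold Spec_count_conversation_rounds; infer_instance

-- ===== CLAIM (what is proved, stated in full; the proofs are below) =====
def Claim_equal_count_conversation_rounds : Prop := ∀ (conversation : List (List (String × String))), Dom_count_conversation_rounds conversation → Spec_count_conversation_rounds conversation (count_conversation_rounds conversation)

-- ===== LEMMAS AND PROOFS =====

-- adjacent-transition count (proof-side characterisation of A's fold)
def uaTrans : List String → Int
  | a :: b :: l => (if a = "user" ∧ b = "assistant" then 1 else 0) + uaTrans (b :: l)
  | _ => 0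

-- A's fold from state (acc, prev) computes acc + transitions of prev consed onto the remaining roles
theorem foldA_eq (conversation : List (List (String × String))) (acc : Int) (prev : Option String) :
    (conversation.foldl (fun (st : Int × Option String) msg =>
        let role := normalizeRole ((PySem.Dict.mk msg).get? "role")
        if role = "system" then st
        else (if st.2 = some "user" ∧ role = "assistant" then st.1 + 1 else st.1, some role))
      (acc, prev)).1
    = acc + uaTrans (match prev with | none => rolesOf conversation | some p => p :: rolesOf conversation) := by
  induction conversation generalizing acc prev with
  | nil => cases prev <;> simp [rolesOf, uaTrans]
  | cons msg rest ih =>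
    simp only [List.foldl_cons, rolesOf, List.map_cons, List.filter_cons]
    by_cases hs : normalizeRole ((PySem.Dict.mk msg).get? "role") = "system"
    · simp only [hs, if_pos]
      rw [ih]
      simp [rolesOf]
    · simp only [if_neg hs]
      rw [ih]
      have hf : (normalizeRole ((PySem.Dict.mk msg).get? "role")) ≠ "system" := hs
      simp only [ne_eq, hf, not_false_eq_true, decide_true, if_pos]
      cases prev with
      | none =>
        simp only [rolesOf]
        simp
      | some p =>
        simp only [rolesOf, uaTrans]
        by_cases hp : p = "user" ∧ normalizeRole ((PySem.Dict.mk msg).get? "role") = "assistant"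
        · simp [hp.1, hp.2] ; ring
        · have : ¬ ((some p = some "user") ∧ normalizeRole ((PySem.Dict.mk msg).get? "role") = "assistant") := by
            simpa using hp
          rw [if_neg this, if_neg hp]
          ring

-- after filtering out "system", every role is "user" or "assistant"
theorem rolesOf_binary (conversation : List (List (String × String))) :
    ∀ x ∈ rolesOf conversation, x = "user" ∨ x = "assistant" := by
  intro x hx
  simp only [rolesOf, List.mem_filter, List.mem_map] at hx
  obtain ⟨⟨msg, _, hm⟩, hne⟩ := hx
  simp only [ne_eq, decide_eq_true_eq] at hne
  subst hm
  unfold normalizeRole at hne ⊢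
  dsimp only at hne ⊢
  split_ifs with h
  · rcases h with h | h | h
    · exact Or.inl h
    · exact Or.inr h
    · rw [if_pos (Or.inr (Or.inr h))] at hne; exact absurd h hne
  · exact Or.inl rfl

theorem uaTrans_cons_ne (x : String) (l : List String) (hx : x ≠ "user") :
    uaTrans (x :: l) = uaTrans l := by
  cases l with
  | nil => simp [uaTrans]
  | cons b t => simp [uaTrans, hx]

theorem uaTrans_dropWhile_user (l : List String) :
    uaTrans (l.dropWhile (fun r => r ≠ "user")) = uaTrans l := by
  induction l with
  | nil => rfl
  | cons a t ih =>
    by_cases ha : a = "user"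
    · simp [ha]
    · rw [List.dropWhile_cons, if_pos (by simp [ha]), ih, uaTrans_cons_ne a t ha]

-- a list headed by "user" with binary alphabet: its transition count is 1 + count of the tail
-- of its first assistant suffix (0 if none)
theorem uaTrans_user_head (l : List String)
    (hb : ∀ x ∈ l, x = "user" ∨ x = "assistant") (hh : l.head? = some "user") :
    uaTrans l = (match l.dropWhile (fun r => r ≠ "assistant") with
                 | [] => 0
                 | _ :: t => 1 + uaTrans t) := by
  induction l with
  | nil => simp at hh
  | cons a rest ih =>
    simp only [List.head?_cons, Option.some.injEq] at hh
    subst hh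
    rw [List.dropWhile_cons, if_pos (by decide)]
    cases rest with
    | nil => simp [uaTrans]
    | cons b t =>
      rcases hb b (by simp) with hbu | hba
      · subst hbu
        have hstep : uaTrans ("user" :: "user" :: t) = uaTrans ("user" :: t) := by
          simp [uaTrans]
        rw [hstep]
        exact ih (fun x hx => hb x (List.mem_cons_of_mem _ hx)) (by simp)
      · subst hba
        rw [List.dropWhile_cons, if_neg (by decide)]
        simp [uaTrans, uaTrans_cons_ne "assistant" t (by decide)]

theorem goRounds_eq (l : List String) (rounds : Int)
    (hb : ∀ x ∈ l, x = "user" ∨ x = "assistant") :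
    goRounds rounds l = rounds + uaTrans l := by
  rw [goRounds]
  split
  next h =>
    rcases hu : l.dropWhile (fun r => r ≠ "user") with _ | ⟨a, t1⟩
    · rw [← uaTrans_dropWhile_user l, hu]; simp [uaTrans]
    · have ha : a = "user" := by
        have := List.head?_dropWhile_not (fun r => r ≠ "user") l
        rw [hu] at this; simpa using this
      have hbin : ∀ x ∈ a :: t1, x = "user" ∨ x = "assistant" := fun x hx =>
        hb x ((List.dropWhile_sublist _).subset (hu ▸ hx))
      have hchar := uaTrans_user_head (a :: t1) hbin (by simp [ha])
      rw [← hu, h] at hchar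
      rw [← uaTrans_dropWhile_user l, hchar]
      simp
  next x t h =>
    rcases hu : l.dropWhile (fun r => r ≠ "user") with _ | ⟨a, t1⟩
    · rw [hu] at h; simp at h
    · have ha : a = "user" := by
        have := List.head?_dropWhile_not (fun r => r ≠ "user") l
        rw [hu] at this; simpa using this
      have hbin : ∀ x ∈ a :: t1, x = "user" ∨ x = "assistant" := fun x hx =>
        hb x ((List.dropWhile_sublist _).subset (hu ▸ hx))
      have hsub : (x :: t).Sublist (a :: t1) := by
        rw [← h, hu]; exact List.dropWhile_sublist _
      have hbt : ∀ y ∈ t, y = "user" ∨ y = "assistant" := fun y hy =>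
        hbin y (hsub.subset (List.mem_cons_of_mem _ hy))
      have hchar := uaTrans_user_head (a :: t1) hbin (by simp [ha])
      rw [← hu, h] at hchar
      rw [goRounds_eq t (rounds + 1) hbt, ← uaTrans_dropWhile_user l, hchar]
      ring
termination_by l.length
decreasing_by
  rename_i heq
  have h1 : ((l.dropWhile (fun r => r ≠ "user")).dropWhile (fun r => r ≠ "assistant")).length ≤ l.length :=
    le_trans ((List.dropWhile_sublist _).length_le) ((List.dropWhile_sublist _).length_le)
  rw [heq] at h1; simp at h1; omega

-- ===== VERDICT (by name: the statement is the Claim_ definition above) =====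
theorem count_conversation_rounds_spec : Claim_equal_count_conversation_rounds := by
  intro conversation _
  unfold Spec_count_conversation_rounds count_conversation_rounds count_conversation_rounds_alt
  rw [foldA_eq conversation 0 none, goRounds_eq _ 0 (rolesOf_binary conversation)]
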